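-- pv_equiv track=rewrite | github.com/superbinlee/cvds | src/cvds/s3_mock_image/s3_mock_face/mock_face.py | split_features
-- ===== SOURCE A (Python) =====
-- FEATURE_DIMENSIONS = {
--     'keypoints': 304,
--     'skin_color': 32,
--     'lbp': 64,
--     'contour': 32,
--     'glasses': 1,
--     'mask': 1,
--     'hair': 32,
--     'gender': 1,
--     'age': 1,
--     'expression': 1,
--     'pose': 16,
--     'quality': 8,
--     'occlusion': 8
-- }
--
-- def split_features(combined_vector):
--     split_features = {}
--     start = 0
--     for feature_name, dim in FEATURE_DIMENSIONS.items():
--         end = start + dim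
--         split_features[feature_name] = combined_vector[start:end]
--         start = end
--     return split_features
-- ===== SOURCE B (Python) =====
-- FEATURE_DIMENSIONS = {
--     'keypoints': 304,
--     'skin_color': 32,
--     'lbp': 64,
--     'contour': 32,
--     'glasses': 1,
--     'mask': 1,
--     'hair': 32,
--     'gender': 1,
--     'age': 1,
--     'expression': 1,
--     'pose': 16,
--     'quality': 8,
--     'occlusion': 8
-- }
--
-- def split_features(combined_vector):
--     def go(vec, items):
--         if not items:
--             return {}
--         (name, dim), rest = items[0], items[1:]
--         out = {name: vec[:dim]}
--         out.update(go(vec[dim:], rest))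
--         return out
--     return go(combined_vector, list(FEATURE_DIMENSIONS.items()))
-- ===== Notes on version B (the rewrite author's own statement) =====
-- stated objective: alternative
-- what changed: B never computes offsets at all: it recurses over the feature list while consuming the vector itself, taking the head slice vec[:dim] and recursing on the remainder vec[dim:], instead of A's iterative loop that keeps a running start/end index into the full vector.
import Mathlib
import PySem

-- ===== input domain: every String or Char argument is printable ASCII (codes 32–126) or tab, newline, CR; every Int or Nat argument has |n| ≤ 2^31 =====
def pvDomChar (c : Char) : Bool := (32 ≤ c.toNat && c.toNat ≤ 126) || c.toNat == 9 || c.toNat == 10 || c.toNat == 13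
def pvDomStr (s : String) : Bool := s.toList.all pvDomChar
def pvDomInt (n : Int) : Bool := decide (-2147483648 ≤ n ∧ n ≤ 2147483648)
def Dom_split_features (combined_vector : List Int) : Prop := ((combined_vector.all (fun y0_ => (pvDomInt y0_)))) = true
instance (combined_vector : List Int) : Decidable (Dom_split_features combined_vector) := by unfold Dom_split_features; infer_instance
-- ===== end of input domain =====

-- B recurses over the feature list consuming the vector (head slice + rest), instead of A's running-offset loop; objective: alternative decomposition, same cost.

-- ===== PORT A =====
def FEATURE_DIMENSIONS : List (String × Int) := [("keypoints", 304), ("skin_color", 32), ("lbp", 64), ("contour", 32), ("glasses", 1), ("mask", 1), ("hair", 32), ("gender", 1), ("age", 1), ("expression", 1), ("pose", 16), ("quality", 8), ("occlusion", 8)]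

-- transliteration of A: one accumulating loop over the dict items, inserting each slice at [start:end]
def split_features (combined_vector : List Int) : List (String × List Int) :=
  (FEATURE_DIMENSIONS.foldl
    (fun (st : PySem.Dict String (List Int) × Int) p =>
      let start := st.2
      let dim := p.2
      let e := start + dim
      (st.1.insert p.1 (PySem.List.slice combined_vector (some start) (some e)), e))
    ((PySem.Dict.empty : PySem.Dict String (List Int)), 0)).1.items

-- ===== PORT B =====
-- transliteration of B's helper go: take vec[:dim] for the head feature, recurse on vec[dim:]
def pvGoB (vec : List Int) : List (String × Int) → List (String × List Int)
  | [] => []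
  | (name, dim) :: rest =>
      (name, PySem.List.slice vec none (some dim)) :: pvGoB (PySem.List.slice vec (some dim) none) rest

def split_features_alt (combined_vector : List Int) : List (String × List Int) :=
  pvGoB combined_vector FEATURE_DIMENSIONS

-- ===== PRECONDITION & SPEC =====
def Spec_split_features (combined_vector : List Int) (out : List (String × List Int)) : Prop := out = split_features_alt combined_vector
instance (combined_vector : List Int) (out : List (String × List Int)) : Decidable (Spec_split_features combined_vector out) := by unfold Spec_split_features; infer_instance

-- ===== CLAIM =====
def Claim_equal_split_features : Prop := ∀ (combined_vector : List Int), Dom_split_features combined_vector → Spec_split_features combined_vector (split_features combined_vector)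

-- ===== LEMMAS AND PROOFS =====

-- ===== VERDICT =====
theorem split_features_spec : Claim_equal_split_features := by
  intro v _
  unfold Spec_split_features
  simp [split_features, split_features_alt, FEATURE_DIMENSIONS, pvGoB,
        PySem.List.slice_toNat, PySem.List.slice_to, PySem.List.slice_from,
        PySem.Dict.insert, PySem.Dict.empty, List.drop_drop]
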